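-- pv_equiv track=rewrite | github.com/nukusumus/Pisnovac | pisnovac_v0.5.py | ignore_comments
-- ===== SOURCE A (Python) =====
-- def ignore_comments(text: str) -> str:
--     """vrati predany string bez radku zacinajicich znakem %"""
--
--     new_text = ""
--     skipping = False
--     for letter in text:
--         if letter == '%':
--             skipping = True
--         elif not skipping:
--             new_text += letter
--
--     return new_text
-- ===== SOURCE B (Python) =====
-- def ignore_comments(text: str) -> str:
--     """vrati predany string bez radku zacinajicich znakem %"""
--     return text.partition('%')[0]
-- ===== Notes on version B (the rewrite author's own statement) =====
-- stated objective: simpler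
-- what changed: Replaced the per-character loop with its skipping flag and repeated string concatenation by a single partition('%') returning the prefix before the first '%'.
import Mathlib
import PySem

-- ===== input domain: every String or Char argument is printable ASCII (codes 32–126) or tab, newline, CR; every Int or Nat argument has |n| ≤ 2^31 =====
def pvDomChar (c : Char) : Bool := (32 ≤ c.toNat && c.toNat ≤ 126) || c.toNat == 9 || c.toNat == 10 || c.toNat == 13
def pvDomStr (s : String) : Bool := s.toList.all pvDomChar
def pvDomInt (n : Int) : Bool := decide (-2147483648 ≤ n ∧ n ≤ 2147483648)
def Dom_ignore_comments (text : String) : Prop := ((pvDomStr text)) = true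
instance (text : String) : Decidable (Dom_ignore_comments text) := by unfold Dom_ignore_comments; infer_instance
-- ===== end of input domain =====

-- B replaces A's per-character loop with skipping flag by partition('%')[0]: simpler, same result.


-- ===== PORT A =====
-- Port of A: fold over the characters with accumulator (new_text, skipping), in A's order.
-- pvStep is the body of A's for-loop: set the flag on '%', append the letter when not skipping.
def pvStep (st : List Char × Bool) (letter : Char) : List Char × Bool :=
  if letter = '%' then (st.1, true)
  else if !st.2 then (st.1 ++ [letter], st.2)
  else st

def ignore_comments (text : String) : String :=
  String.ofList (text.toList.foldl pvStep ([], false)).1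

-- ===== PORT B =====
-- Port of B: text.partition('%')[0] = the prefix of text before the first '%'.
def ignore_comments_alt (text : String) : String :=
  String.ofList (text.toList.takeWhile (fun c => c != '%'))

-- ===== PRECONDITION & SPEC =====
def Spec_ignore_comments (text : String) (out : String) : Prop := out = ignore_comments_alt text
instance (text : String) (out : String) : Decidable (Spec_ignore_comments text out) := by unfold Spec_ignore_comments; infer_instance

-- ===== CLAIM (what is proved, stated in full; the proofs are below) =====
def Claim_equal_ignore_comments : Prop := ∀ (text : String), Dom_ignore_comments text → Spec_ignore_comments text (ignore_comments text)

-- ===== LEMMAS AND PROOFS =====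

-- ===== VERDICT (by name: the statement is the Claim_ definition above) =====
-- Loop invariant for A's fold: once the skipping flag is set, the accumulator never changes.
theorem pv_foldl_skip (l : List Char) (acc : List Char) :
    l.foldl pvStep (acc, true) = (acc, true) := by
  induction l generalizing acc with
  | nil => rfl
  | cons c l ih =>
    rw [List.foldl_cons]
    have h : pvStep (acc, true) c = (acc, true) := by
      unfold pvStep; split <;> rfl
    rw [h, ih]

-- Before the flag is set, A's fold accumulates exactly the prefix before the first '%'.
theorem pv_foldl_run (l : List Char) (acc : List Char) :
    (l.foldl pvStep (acc, false)).1 = acc ++ l.takeWhile (fun c => c != '%') := by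
  induction l generalizing acc with
  | nil => simp
  | cons c l ih =>
    rw [List.foldl_cons]
    by_cases h : c = '%'
    · have hs : pvStep (acc, false) c = (acc, true) := by simp [pvStep, h]
      rw [hs, pv_foldl_skip]
      simp [h]
    · have hs : pvStep (acc, false) c = (acc ++ [c], false) := by simp [pvStep, h]
      rw [hs, ih]
      simp [h]

theorem ignore_comments_spec : Claim_equal_ignore_comments := by
  intro text _
  unfold Spec_ignore_comments ignore_comments ignore_comments_alt
  rw [pv_foldl_run]
  simp
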